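-- pv_equiv track=rewrite | github.com/EKGF/ekg-catalog | docs/mkdocs/content.py | remove_diagram_tags
-- ===== SOURCE A (Python) =====
-- def remove_diagram_tags(body: str) -> str:
--     """Remove PlantUML diagram object tags from markdown body (diagrams are injected by template)."""
--     lines = body.splitlines()
--     filtered = []
--     i = 0
--     while i < len(lines):
--         line = lines[i].strip()
--         # Remove <object> tags that reference diagrams/out/*.svg
--         if line.startswith("<object") and "diagrams/out" in line and ".svg" in line:
--             # Skip until closing </object> tag
--             while i < len(lines) and "</object>" not in lines[i]:
--                 i += 1
--             if i < len(lines) and "</object>" in lines[i]: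
--                 i += 1
--             continue
--         filtered.append(lines[i])
--         i += 1
--     return "\n".join(filtered)
-- ===== SOURCE B (Python) =====
-- def remove_diagram_tags(body: str) -> str:
--     """Remove PlantUML diagram object tags from markdown body (diagrams are injected by template)."""
--     kept = []
--     skipping = False
--     for raw in body.splitlines():
--         if skipping:
--             if "</object>" in raw:
--                 skipping = False
--             continue
--         s = raw.strip()
--         if s.startswith("<object") and "diagrams/out" in s and ".svg" in s:
--             if "</object>" not in raw:
--                 skipping = True
--             continue
--         kept.append(raw)
--     return "\n".join(kept)
-- ===== Notes on version B (the rewrite author's own statement) =====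
-- stated objective: simpler
-- what changed: Replaced the while loop over an explicit index with a nested skip-ahead loop by a single flat for-loop over the lines maintaining a boolean skip state.
import Mathlib
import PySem

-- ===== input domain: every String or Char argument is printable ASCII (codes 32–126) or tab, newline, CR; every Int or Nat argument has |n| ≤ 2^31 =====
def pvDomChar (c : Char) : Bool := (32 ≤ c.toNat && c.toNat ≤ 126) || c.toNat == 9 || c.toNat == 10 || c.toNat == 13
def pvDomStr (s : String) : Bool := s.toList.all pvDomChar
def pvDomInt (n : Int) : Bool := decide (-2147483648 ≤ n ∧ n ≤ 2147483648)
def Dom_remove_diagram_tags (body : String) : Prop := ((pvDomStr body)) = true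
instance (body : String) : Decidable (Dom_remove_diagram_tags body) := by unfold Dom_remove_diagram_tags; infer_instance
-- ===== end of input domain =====

-- B replaces A's index-based while loop with an inner skip loop by one flat pass
-- keeping a boolean skip state (objective: simpler).

-- ===== PORT A =====
mutual
  -- the outer 'while i < len(lines)' loop of A, on the remaining lines
  def pvGoA : List String → List String
    | [] => []
    | l :: rest =>
      let line := PySem.Str.strip l
      if PySem.Str.startswith line "<object" && PySem.Str.isIn "diagrams/out" line
           && PySem.Str.isIn ".svg" line then
        pvSkipA (l :: rest)
      else
        l :: pvGoA rest
  termination_by xs => (xs.length, 1)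

  -- the inner 'while … "</object>" not in lines[i]' skip loop, plus the one extra i += 1
  def pvSkipA : List String → List String
    | [] => []
    | l :: rest =>
      if PySem.Str.isIn "</object>" l then pvGoA rest
      else pvSkipA rest
  termination_by xs => (xs.length, 0)
end

def remove_diagram_tags (body : String) : String :=
  PySem.Str.join "\n" (pvGoA (PySem.Str.splitlines body))

-- ===== PORT B =====
-- the body of Source B's for-loop; state = (kept, skipping)
def pvStepB (st : List String × Bool) (raw : String) : List String × Bool :=
  if st.2 then
    if PySem.Str.isIn "</object>" raw then (st.1, false) else (st.1, true)
  else
    let s := PySem.Str.strip raw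
    if PySem.Str.startswith s "<object" && PySem.Str.isIn "diagrams/out" s
         && PySem.Str.isIn ".svg" s then
      if PySem.Str.isIn "</object>" raw then (st.1, false) else (st.1, true)
    else
      (st.1 ++ [raw], false)

def remove_diagram_tags_alt (body : String) : String :=
  PySem.Str.join "\n" (((PySem.Str.splitlines body).foldl pvStepB ([], false)).1)

-- ===== PRECONDITION & SPEC =====
def Spec_remove_diagram_tags (body : String) (out : String) : Prop := out = remove_diagram_tags_alt body
instance (body : String) (out : String) : Decidable (Spec_remove_diagram_tags body out) := by unfold Spec_remove_diagram_tags; infer_instance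

-- ===== CLAIM (what is proved, stated in full; the proofs are below) =====
def Claim_equal_remove_diagram_tags : Prop := ∀ (body : String), Dom_remove_diagram_tags body → Spec_remove_diagram_tags body (remove_diagram_tags body)

-- ===== LEMMAS AND PROOFS =====

-- B's fold from either skipping state computes A's corresponding loop, appended to the kept lines
theorem pvFold_eq_A (xs : List String) : ∀ acc : List String,
    (xs.foldl pvStepB (acc, false)).1 = acc ++ pvGoA xs ∧
    (xs.foldl pvStepB (acc, true)).1 = acc ++ pvSkipA xs := by
  induction xs with
  | nil => intro acc; simp [pvGoA, pvSkipA]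
  | cons l rest ih =>
    intro acc
    refine ⟨?_, ?_⟩
    · rw [List.foldl_cons]
      by_cases hop : (PySem.Str.startswith (PySem.Str.strip l) "<object"
          && PySem.Str.isIn "diagrams/out" (PySem.Str.strip l)
          && PySem.Str.isIn ".svg" (PySem.Str.strip l)) = true
      · by_cases hcl : PySem.Str.isIn "</object>" l = true
        · rw [show pvStepB (acc, false) l = (acc, false) by simp only [pvStepB]; rw [if_pos hop, if_pos hcl]; simp]
          rw [(ih acc).1]
          simp only [pvGoA, pvSkipA]
          rw [if_pos hop, if_pos hcl]
        · rw [show pvStepB (acc, false) l = (acc, true) by simp only [pvStepB]; rw [if_pos hop, if_neg hcl]; simp]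
          rw [(ih acc).2]
          simp only [pvGoA, pvSkipA]
          rw [if_pos hop, if_neg hcl]
      · rw [show pvStepB (acc, false) l = (acc ++ [l], false) by simp only [pvStepB]; rw [if_neg hop]; simp]
        rw [(ih (acc ++ [l])).1, List.append_assoc]
        simp only [pvGoA]
        rw [if_neg hop]
        rfl
    · rw [List.foldl_cons]
      by_cases hcl : PySem.Str.isIn "</object>" l = true
      · rw [show pvStepB (acc, true) l = (acc, false) by simp only [pvStepB]; rw [if_pos hcl]; simp]
        rw [(ih acc).1]
        simp only [pvSkipA]
        rw [if_pos hcl]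
      · rw [show pvStepB (acc, true) l = (acc, true) by simp only [pvStepB]; rw [if_neg hcl]; simp]
        rw [(ih acc).2]
        simp only [pvSkipA]
        rw [if_neg hcl]

-- ===== VERDICT (by name: the statement is the Claim_ definition above) =====
theorem remove_diagram_tags_spec : Claim_equal_remove_diagram_tags := by
  intro body _
  unfold Spec_remove_diagram_tags remove_diagram_tags remove_diagram_tags_alt
  rw [(pvFold_eq_A (PySem.Str.splitlines body) []).1, List.nil_append]
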